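-- pv_equiv track=rewrite | github.com/xSomoy/AdventOfCode | 2015/Day5/solution_part2.py | letterRepeat
-- ===== SOURCE A (Python) =====
-- def letterRepeat(s):
--     i = 0
--     r = 0
--     while i < len(s) - 2:
--         if s[i] == s[i+2]:
--             r = 1
--             break
--         else:
--             r = 0
--         i += 1
--     return r
-- ===== SOURCE B (Python) =====
-- def letterRepeat(s):
--     ev, od = s[::2], s[1::2]
--     if any(x == y for x, y in zip(ev, ev[1:])) or any(x == y for x, y in zip(od, od[1:])):
--         return 1
--     return 0
-- ===== Notes on version B (the rewrite author's own statement) =====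
-- stated objective: alternative
-- what changed: Replaces the index-based offset-2 while loop by splitting the string into its even- and odd-indexed subsequences and checking each for an adjacent equal pair via zip.
import Mathlib
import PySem

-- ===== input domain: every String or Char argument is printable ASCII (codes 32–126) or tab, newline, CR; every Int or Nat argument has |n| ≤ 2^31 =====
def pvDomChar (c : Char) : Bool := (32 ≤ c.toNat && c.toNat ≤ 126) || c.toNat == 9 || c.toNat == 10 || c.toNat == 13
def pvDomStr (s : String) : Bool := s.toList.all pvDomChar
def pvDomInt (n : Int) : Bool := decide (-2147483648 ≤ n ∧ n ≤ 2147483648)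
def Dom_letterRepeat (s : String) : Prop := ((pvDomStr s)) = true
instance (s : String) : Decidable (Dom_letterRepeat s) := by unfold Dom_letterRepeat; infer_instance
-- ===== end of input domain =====

-- B splits the string into even- and odd-indexed subsequences and checks each for an
-- adjacent equal pair, instead of A's index-based offset-2 scan (alternative decomposition).


-- ===== PORT A =====
-- A's while loop: each iteration compares s[i] with s[i+2] (break with 1 on equality),
-- else advances i; returns 0 when i reaches len(s)-2. Transcribed as the structural
-- recursion over the remaining suffix s[i:], whose head and third element are s[i], s[i+2].
def pvALoop : List Char → Int
  | a :: b :: c :: rest => if a = c then 1 else pvALoop (b :: c :: rest)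
  | _ => 0

def letterRepeat (s : String) : Int := pvALoop s.toList

-- ===== PORT B =====
-- pvEvens l is the slice l[::2]; l[1::2] = pvEvens (l.drop 1); exact for these total slices.
def pvEvens : List Char → List Char
  | [] => []
  | [a] => [a]
  | a :: _ :: rest => a :: pvEvens rest

-- any(x == y for x, y in zip(t, t[1:]))
def pvHasAdj (t : List Char) : Bool := (t.zip t.tail).any (fun p => p.1 == p.2)

def letterRepeat_alt (s : String) : Int :=
  let ev := pvEvens s.toList
  let od := pvEvens (s.toList.drop 1)
  if pvHasAdj ev || pvHasAdj od then 1 else 0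

-- ===== PRECONDITION & SPEC =====
def Spec_letterRepeat (s : String) (out : Int) : Prop := out = letterRepeat_alt s
instance (s : String) (out : Int) : Decidable (Spec_letterRepeat s out) := by unfold Spec_letterRepeat; infer_instance

-- ===== CLAIM (what is proved, stated in full; the proofs are below) =====
def Claim_equal_letterRepeat : Prop := ∀ (s : String), Dom_letterRepeat s → Spec_letterRepeat s (letterRepeat s)

-- ===== LEMMAS AND PROOFS =====

theorem pvEvens_cons_head (c : Char) (rest : List Char) :
    pvEvens (c :: rest) = c :: pvEvens (rest.drop 1) := by
  cases rest <;> rfl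

theorem pvHasAdj_cons_cons (a c : Char) (t : List Char) :
    pvHasAdj (a :: c :: t) = ((a == c) || pvHasAdj (c :: t)) := by
  simp [pvHasAdj]

theorem pvALoop_eq (l : List Char) :
    pvALoop l = if pvHasAdj (pvEvens l) || pvHasAdj (pvEvens (l.drop 1)) then 1 else 0 := by
  induction l using pvALoop.induct with
  | case1 b c rest =>
      rw [pvALoop]
      rw [pvEvens_cons_head c (b :: c :: rest)]
      simp [pvHasAdj_cons_cons, pvEvens_cons_head]
  | case2 a b c rest hac ih =>
      rw [pvALoop]
      rw [if_neg hac, ih]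
      have he : pvHasAdj (pvEvens (a :: b :: c :: rest))
          = pvHasAdj (pvEvens ((b :: c :: rest).drop 1)) := by
        rw [pvEvens_cons_head a (b :: c :: rest)]
        show pvHasAdj (a :: pvEvens (c :: rest)) = _
        rw [pvEvens_cons_head c rest, pvHasAdj_cons_cons, ← pvEvens_cons_head c rest]
        simp [hac]
      rw [he]
      simp [Bool.or_comm]
  | case3 t h =>
      match t, h with
      | [], _ => rfl
      | [a], _ => rfl
      | [a, b], _ => rfl
      | a :: b :: c :: rest, h => exact absurd rfl (h a b c rest)

-- ===== VERDICT (by name: the statement is the Claim_ definition above) =====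
theorem letterRepeat_spec : Claim_equal_letterRepeat := by
  intro s _
  show letterRepeat s = letterRepeat_alt s
  rw [letterRepeat, letterRepeat_alt, pvALoop_eq]
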